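-- pv_equiv track=rewrite | github.com/DevilCoders/Yandex | antiadblock/configs_api/lib/auth/permissions.py | get_upper_nodes_tree
-- ===== SOURCE A (Python) =====
-- def get_upper_nodes_tree(node):
--     """
--     returns list of upper permission nodes.
--     :param node:
--     :return:
--
--     >>> get_upper_nodes_tree('*')
--     ['*']
--
--     >>> get_upper_nodes_tree('*#services#auto_ru')
--     ['*', '*#services', '*#services#auto_ru']
--
--     """
--
--     nodes = []
--     growing_node = ""
--     for edge in node.split("#"):
--         if growing_node:
--             growing_node += "#"
--         growing_node += edge
--         nodes.append(growing_node)
--     return nodes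
-- ===== SOURCE B (Python) =====
-- def get_upper_nodes_tree(node):
--     nodes = [node[:i] for i, ch in enumerate(node) if ch == "#"]
--     nodes.append(node)
--     return nodes
-- ===== Notes on version B (the rewrite author's own statement) =====
-- stated objective: simpler
-- what changed: B drops the split-and-rejoin: it scans the raw string once and emits the slice of the string up to each hash position (plus the whole string), instead of splitting on the hash delimiter and re-concatenating a growing buffer edge by edge.
-- intended difference: On inputs whose first character is a hash, the truthiness test on A's growing buffer skips the separator after the leading empty piece, so every later prefix A returns is missing the leading hash; B returns the true cumulative prefixes of the input, the intended value for a permission-prefix tree. — e.g. on get_upper_nodes_tree("#a"): A returns ["", "a"], B returns ["", "#a"]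
import Mathlib
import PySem

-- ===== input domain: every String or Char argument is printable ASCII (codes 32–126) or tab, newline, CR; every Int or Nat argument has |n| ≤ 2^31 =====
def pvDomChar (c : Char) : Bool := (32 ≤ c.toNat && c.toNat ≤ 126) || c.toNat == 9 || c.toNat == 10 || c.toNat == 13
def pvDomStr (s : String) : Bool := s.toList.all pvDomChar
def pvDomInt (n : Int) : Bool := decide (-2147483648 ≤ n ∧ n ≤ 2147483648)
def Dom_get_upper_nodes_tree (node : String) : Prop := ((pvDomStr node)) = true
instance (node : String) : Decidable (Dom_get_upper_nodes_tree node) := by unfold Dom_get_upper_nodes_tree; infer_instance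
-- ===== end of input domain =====

-- B collects the prefix slice at each hash position in one scan instead of splitting on the hash
-- delimiter and re-concatenating a growing buffer (simpler; same cost).

-- ===== PORT A =====
-- loop body of A's for-loop over the split pieces: state = (nodes, growing_node)
def pvStepA (st : List (List Char) × List Char) (edge : List Char) : List (List Char) × List Char :=
  let g1 := if st.2.isEmpty then st.2 else st.2 ++ ['#']   -- append separator if buffer nonempty
  let g2 := g1 ++ edge                                      -- append the edge
  (st.1 ++ [g2], g2)                                        -- append buffer to nodes

def get_upper_nodes_tree (node : String) : List String :=
  ((PySem.Chars.splitOn node.toList ['#']).foldl pvStepA ([], [])).1.map String.ofList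

-- ===== PORT B =====
def get_upper_nodes_tree_alt (node : String) : List String :=
  (((PySem.List.enumerate node.toList 0).filter (fun p => p.2 == '#')).map
    (fun p => PySem.Str.slice node none (some p.1))) ++ [node]

-- ===== PRECONDITION & SPEC =====
-- On inputs whose first character is a hash, the truthiness test on A's growing buffer skips the
-- separator after the leading empty piece, so every later prefix A returns is missing the leading
-- hash; B returns the true cumulative prefixes of the input, the intended value for a prefix tree.
def D_get_upper_nodes_tree (node : String) : Prop := node.toList.head? = some '#'
instance (node : String) : Decidable (D_get_upper_nodes_tree node) := by unfold D_get_upper_nodes_tree; infer_instance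

def Spec_get_upper_nodes_tree (node : String) (out : List String) : Prop :=
  ¬ D_get_upper_nodes_tree node → out = get_upper_nodes_tree_alt node
instance (node : String) (out : List String) : Decidable (Spec_get_upper_nodes_tree node out) := by
  unfold Spec_get_upper_nodes_tree; infer_instance

def pvDiffWitness_get_upper_nodes_tree : String := "#a"
def pvDiffWitnessOut_get_upper_nodes_tree : (List String) × (List String) := (["", "a"], ["", "#a"])

-- ===== CLAIM (what is proved, stated in full; the proofs are below) =====
def Claim_unchanged_get_upper_nodes_tree : Prop := ∀ (node : String), Dom_get_upper_nodes_tree node → Spec_get_upper_nodes_tree node (get_upper_nodes_tree node)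
def Claim_changed_get_upper_nodes_tree : Prop := Dom_get_upper_nodes_tree (pvDiffWitness_get_upper_nodes_tree) ∧ D_get_upper_nodes_tree (pvDiffWitness_get_upper_nodes_tree) ∧ get_upper_nodes_tree (pvDiffWitness_get_upper_nodes_tree) = pvDiffWitnessOut_get_upper_nodes_tree.1 ∧ get_upper_nodes_tree_alt (pvDiffWitness_get_upper_nodes_tree) = pvDiffWitnessOut_get_upper_nodes_tree.2 ∧ pvDiffWitnessOut_get_upper_nodes_tree.1 ≠ pvDiffWitnessOut_get_upper_nodes_tree.2

-- ===== LEMMAS AND PROOFS =====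

-- the cumulative-prefix list both programs compute: one entry per hash, plus the whole string
def pvF : List Char → List (List Char)
  | [] => [[]]
  | c :: cs => (if c = '#' then [[]] else []) ++ (pvF cs).map (fun t => c :: t)

-- A's loop after the growing buffer is nonempty: every further edge is joined with a hash
def pvCum : List Char → List (List Char) → List (List Char)
  | _, [] => []
  | g, e :: es => (g ++ ['#'] ++ e) :: pvCum (g ++ ['#'] ++ e) es

theorem pv_modifyHead_triv (X : List (List Char)) :
    List.modifyHead (fun t : List Char => t) X = X := by
  have h : (fun t : List Char => t) = id := rfl
  rw [h, List.modifyHead_id]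
  rfl

theorem pv_go_eq (fuel : Nat) : ∀ (l cur : List Char) (accs : List (List Char)),
    l.length < fuel →
    PySem.Chars.splitOn.go ['#'] fuel l cur accs =
      accs.reverse ++ List.modifyHead (fun t => cur.reverse ++ t) (l.splitOnP (· == '#')) := by
  induction fuel with
  | zero => intro l cur accs h; omega
  | succ n ih =>
    intro l cur accs h
    cases l with
    | nil =>
      simp [PySem.Chars.splitOn.go, List.splitOnP_nil]
    | cons c rest =>
      by_cases hc : c = '#'
      · subst hc
        rw [PySem.Chars.splitOn.go]
        simp only [List.isPrefixOf, beq_self_eq_true, Bool.true_and, if_pos]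
        have hd : List.drop (['#'] : List Char).length ('#' :: rest) = rest := rfl
        rw [hd, ih rest [] (List.reverse cur :: accs) (by simp at h ⊢; omega)]
        simp [List.splitOnP_cons]
        rw [pv_modifyHead_triv]
      · rw [PySem.Chars.splitOn.go]
        have hpre : (['#'].isPrefixOf (c :: rest)) = false := by
          simp [List.isPrefixOf]; exact fun h => absurd h.symm hc
        rw [if_neg (by simp [hpre])]
        rw [ih rest (c :: cur) accs (by simp at h ⊢; omega)]
        rw [List.splitOnP_cons, if_neg (by simp [hc]), List.modifyHead_modifyHead]
        congr 1
        apply congrFun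
        apply congrArg
        funext t
        simp

theorem pv_splitOn_eq (l : List Char) :
    PySem.Chars.splitOn l ['#'] = l.splitOnP (· == '#') := by
  unfold PySem.Chars.splitOn
  rw [pv_go_eq (l.length + 1) l [] [] (by omega)]
  simp only [List.reverse_nil, List.nil_append]
  rw [pv_modifyHead_triv]

theorem pv_foldl_step (es : List (List Char)) : ∀ (g : List Char) (acc : List (List Char)),
    g ≠ [] → (es.foldl pvStepA (acc, g)).1 = acc ++ pvCum g es := by
  induction es with
  | nil => intro g acc _; simp [pvCum]
  | cons e es ih =>
    intro g acc hg
    have hstep : pvStepA (acc, g) e = (acc ++ [g ++ ['#'] ++ e], g ++ ['#'] ++ e) := by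
      simp [pvStepA, List.isEmpty_iff, hg, List.append_assoc]
    rw [List.foldl_cons, hstep, ih _ _ (by simp)]
    simp [pvCum]

theorem pv_cum_eq (cs : List Char) : ∀ (q g : List Char),
    pvCum g (List.modifyHead (fun t => q ++ t) (cs.splitOnP (· == '#'))) =
      (pvF cs).map (fun t => g ++ '#' :: (q ++ t)) := by
  induction cs with
  | nil => intro q g; simp [List.splitOnP_nil, pvCum, pvF]
  | cons c cs ih =>
    intro q g
    by_cases hc : c = '#'
    · subst hc
      have h0 := ih [] (g ++ ['#'] ++ q)
      simp only [List.nil_append] at h0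
      have hid : List.modifyHead (fun t : List Char => t) (cs.splitOnP (· == '#')) =
          cs.splitOnP (· == '#') := by
        have : (fun t : List Char => t) = id := rfl
        rw [this, List.modifyHead_id, id]
      rw [hid] at h0
      have hX : pvCum g (List.modifyHead (fun t => q ++ t) (('#' :: cs).splitOnP (· == '#'))) =
          (g ++ ['#'] ++ q) :: pvCum (g ++ ['#'] ++ q) (cs.splitOnP (· == '#')) := by
        rw [List.splitOnP_cons, if_pos (by simp)]
        simp [pvCum]
      rw [hX, h0]
      have hF : pvF ('#' :: cs) = [] :: (pvF cs).map (fun t => '#' :: t) := by simp [pvF]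
      rw [hF]
      simp only [List.map_cons, List.map_map]
      congr 1
      · simp
      · congr 1
        funext t
        simp
    · rw [List.splitOnP_cons, if_neg (by simp [hc]), List.modifyHead_modifyHead]
      have hfun : ((fun t : List Char => q ++ t) ∘ List.cons c) = (fun t => (q ++ [c]) ++ t) := by
        funext t; simp
      rw [hfun, ih (q ++ [c]) g]
      simp [pvF, hc, List.map_map]

theorem pv_top (cs : List Char) : ∀ (q : List Char), q ≠ [] →
    ((List.modifyHead (fun t => q ++ t) (cs.splitOnP (· == '#'))).foldl pvStepA ([], [])).1 =
      (pvF cs).map (fun t => q ++ t) := by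
  induction cs with
  | nil =>
    intro q _
    simp [List.splitOnP_nil, pvF, pvStepA]
  | cons c cs ih =>
    intro q hq
    by_cases hc : c = '#'
    · subst hc
      rw [List.splitOnP_cons, if_pos (by simp)]
      simp only [List.modifyHead_cons, List.append_nil]
      have hstep : pvStepA (([] : List (List Char)), ([] : List Char)) q = ([q], q) := by
        simp [pvStepA]
      rw [List.foldl_cons, hstep, pv_foldl_step _ _ _ hq]
      have h0 := pv_cum_eq cs [] q
      have hid : List.modifyHead (fun t : List Char => [] ++ t) (cs.splitOnP (· == '#')) =
          cs.splitOnP (· == '#') := by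
        have : (fun t : List Char => [] ++ t) = id := by funext t; simp
        rw [this, List.modifyHead_id, id]
      rw [hid] at h0
      rw [h0]
      simp [pvF, List.map_map]
    · rw [List.splitOnP_cons, if_neg (by simp [hc]), List.modifyHead_modifyHead]
      have hfun : ((fun t : List Char => q ++ t) ∘ List.cons c) = (fun t => (q ++ [c]) ++ t) := by
        funext t; simp
      rw [hfun, ih (q ++ [c]) (by simp)]
      simp [pvF, hc, List.map_map]

theorem pv_A_char (c : Char) (cs : List Char) (hc : c ≠ '#') :
    ((PySem.Chars.splitOn (c :: cs) ['#']).foldl pvStepA ([], [])).1 = pvF (c :: cs) := by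
  rw [pv_splitOn_eq, List.splitOnP_cons, if_neg (by simp [hc])]
  have h1 : List.modifyHead (List.cons c) (cs.splitOnP (· == '#')) =
      List.modifyHead (fun t => [c] ++ t) (cs.splitOnP (· == '#')) := by
    congr 1
  rw [h1, pv_top cs [c] (by simp)]
  simp [pvF, hc]

theorem pv_alt_eq (cs : List Char) : ∀ (pre : List Char),
    (((PySem.List.enumerate cs (pre.length : Int)).filter (fun p => p.2 == '#')).map
      (fun p => PySem.List.slice (pre ++ cs) none (some p.1))) ++ [pre ++ cs] =
      (pvF cs).map (fun t => pre ++ t) := by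
  induction cs with
  | nil => intro pre; simp [PySem.List.enumerate, pvF]
  | cons c cs ih =>
    intro pre
    rw [PySem.List.enumerate_cons]
    have hlen : ((pre.length : Int) + 1) = (((pre ++ [c]).length : Nat) : Int) := by
      simp [List.length_append]
    have happ : pre ++ c :: cs = (pre ++ [c]) ++ cs := by simp
    by_cases hc : c = '#'
    · subst hc
      simp only [List.filter_cons, beq_self_eq_true, if_pos, List.map_cons]
      have hsl : PySem.List.slice (pre ++ '#' :: cs) none (some ((pre.length : Nat) : Int)) = pre := by
        rw [PySem.List.slice_to_natCast, List.take_left]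
      rw [hsl, hlen, happ, List.cons_append, ih (pre ++ ['#'])]
      have hF : pvF ('#' :: cs) = [] :: (pvF cs).map (fun t => '#' :: t) := by simp [pvF]
      rw [hF]
      simp only [List.map_cons, List.map_map]
      congr 1
      · simp
      · congr 1
        funext t
        simp
    · have hfc : ((((pre.length : Int)), c).2 == '#') = false := by simp [hc]
      rw [List.filter_cons, hfc]
      simp only [Bool.false_eq_true, if_false]
      rw [hlen, happ, ih (pre ++ [c])]
      simp [pvF, hc, List.map_map]

theorem pv_B_eq (node : String) :
    get_upper_nodes_tree_alt node = (pvF node.toList).map String.ofList := by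
  unfold get_upper_nodes_tree_alt
  have hfun : (fun p : Int × Char => PySem.Str.slice node none (some p.1)) =
      (fun p : Int × Char => String.ofList (PySem.List.slice node.toList none (some p.1))) := by
    funext p; simp [PySem.Str.slice]
  rw [hfun]
  have hnode : [node] = [String.ofList node.toList] := by rw [String.ofList_toList]
  rw [hnode]
  have h := pv_alt_eq node.toList []
  simp only [List.length_nil, Nat.cast_zero, List.nil_append] at h
  calc (((PySem.List.enumerate node.toList 0).filter (fun p => p.2 == '#')).map
          (fun p => String.ofList (PySem.List.slice node.toList none (some p.1)))) ++
        [String.ofList node.toList]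
      = (((((PySem.List.enumerate node.toList 0).filter (fun p => p.2 == '#')).map
          (fun p => PySem.List.slice node.toList none (some p.1))) ++ [node.toList]).map
            String.ofList) := by simp [List.map_map]
    _ = (pvF node.toList).map String.ofList := by rw [h]; simp

-- ===== VERDICT (by name: the statement is the Claim_ definition above) =====
theorem get_upper_nodes_tree_spec : Claim_unchanged_get_upper_nodes_tree := by
  intro node _
  unfold Spec_get_upper_nodes_tree
  intro hnD
  rw [pv_B_eq]
  cases hl : node.toList with
  | nil =>
    unfold get_upper_nodes_tree
    rw [hl]
    rfl
  | cons c cs =>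
    have hc : c ≠ '#' := by
      intro h
      exact hnD (by unfold D_get_upper_nodes_tree; rw [hl, h]; rfl)
    unfold get_upper_nodes_tree
    rw [hl, pv_A_char c cs hc]

theorem get_upper_nodes_tree_changed : Claim_changed_get_upper_nodes_tree := by
  unfold Claim_changed_get_upper_nodes_tree; decide
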